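-- pv_equiv track=rewrite | github.com/Anseik/algorithm | study/프로그래머스/pro_괄호 변환2.py | solution
-- ===== SOURCE A (Python) =====
-- def correct(p):
--     # 괄호검사
--     stack = []
--     for i in range(len(p)):
--         if p[i] == "(":
--             stack.append(p[i])
--         elif p[i] == ")":
--             if len(stack) == 0:
--                 return False
--             else:
--                 tmp = stack.pop()
--                 if not tmp == "(" and p[i] == ")":
--                     return False
--
--     if len(stack) != 0:
--         return False
--     return True
--
-- def slice(p):
--     # u, v분리
--     if len(p) == 0:
--         return ""
--     bracket = {
--         "(": 0,
--         ")": 0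
--     }
--     for i in range(len(p)):
--         if p[i] == "(":
--             bracket["("] += 1
--         elif p[i] == ")":
--             bracket[")"] += 1
--
--         if bracket["("] == bracket[")"]:
--             u, v = p[:i + 1], p[i + 1:]
--             break
--
--     return u, v
--
-- def solution(p):
--     answer = ""
--     if correct(p): # 올바른 괄호 문자열이면(빈 문자열 포함)
--         answer += p
--         return answer
--
--     u, v = slice(p)
--
--     if correct(u):
--         answer = u + solution(v)
--         return answer
--
--     else:
--         pair = {"(":")", ")":"("}
--         tmp = u[1:-1]
--
--         nu = ""
--         for i in range(len(tmp)):
--             nu += pair[tmp[i]]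
--
--         # for i in range(len(tmp)):
--         #     if tmp[i] == "(":
--         #         nu += ")"
--         #     elif tmp[i] == ")":
--         #         nu += "("
--
--         answer = "(" + solution(v) + ")" + nu
--         return answer
-- ===== SOURCE B (Python) =====
-- def solution(p):
--     # Single linear pass: locate zero-balance chunks with a running counter,
--     # wrap chunks that open with ')' (queuing ')' + flipped interior on a
--     # stack appended back-to-front at the end), emit every other chunk as-is.
--     bal = 0
--     for c in p:
--         if c == '(':
--             bal += 1
--         elif c == ')':
--             bal -= 1
--             if bal < 0:
--                 break
--     else:
--         if bal == 0:
--             return p  # already a correct sequence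
--
--     out = []
--     tails = []
--     start = 0
--     bal = 0
--     for i, c in enumerate(p):
--         if c == '(':
--             bal += 1
--         elif c == ')':
--             bal -= 1
--         if bal == 0:
--             u = p[start:i + 1]
--             if u[0] == ')':
--                 out.append('(')
--                 tails.append(')' + ''.join('(' if x == ')' else ')' for x in u[1:-1]))
--             else:
--                 out.append(u)
--             start = i + 1
--     while tails:
--         out.append(tails.pop())
--     return ''.join(out)
-- ===== Notes on version B (the rewrite author's own statement) =====
-- stated objective: faster
-- what changed: Replaces the O(n^2) recursion (which rescans the remainder with correct() and slice() at every level) by one linear pass that cuts the string at zero-balance points with a running counter, emitting chunks directly unless they open with ')', whose flipped interiors are stacked and appended back-to-front.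
import Mathlib
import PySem

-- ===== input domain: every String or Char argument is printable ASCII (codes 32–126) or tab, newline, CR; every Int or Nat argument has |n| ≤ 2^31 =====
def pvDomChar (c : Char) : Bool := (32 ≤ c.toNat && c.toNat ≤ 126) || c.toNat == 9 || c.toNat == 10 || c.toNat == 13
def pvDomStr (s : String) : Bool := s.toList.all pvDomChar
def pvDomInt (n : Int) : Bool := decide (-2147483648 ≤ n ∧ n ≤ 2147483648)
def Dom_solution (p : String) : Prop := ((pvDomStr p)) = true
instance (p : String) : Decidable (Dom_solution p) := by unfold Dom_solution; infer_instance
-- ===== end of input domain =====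

-- B replaces A's O(n^2) recursion (correct()/slice() rescans at every level) by one linear
-- counter-driven pass over the zero-balance chunks; equivalence is proved on Pre_solution.


-- ===== PORT A =====
-- correct(p): scan with an explicit stack (only '(' is ever pushed);
-- the Python test `if not tmp == "(" and p[i] == ")"` runs in the branch where p[i] == ")" holds.
def correctGo : List Char → List Char → Bool
  | [], stack => stack.isEmpty
  | c :: rest, stack =>
    if c = '(' then correctGo rest (c :: stack)
    else if c = ')' then
      match stack with
      | [] => false
      | t :: s => if ¬ (t = '(') then false else correctGo rest s
    else correctGo rest stack

-- slice(p): the dict {"(":0, ")":0} with its two fixed keys is ported as the two counters o, cl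
-- (exact: the dict is only read/written at those literal keys). When the loop ends without the
-- break Python leaves u, v unbound (UnboundLocalError) — unreachable from `solution` under
-- Pre_solution; the port returns the consumed prefix and [] there.
def sliceGo : List Char → Int → Int → List Char → (List Char × List Char)
  | [], _, _, acc => (acc.reverse, [])
  | c :: rest, o, cl, acc =>
    let o' := if c = '(' then o + 1 else o
    let cl' := if c = ')' then cl + 1 else cl
    if o' = cl' then ((c :: acc).reverse, rest)
    else sliceGo rest o' cl' (c :: acc)

-- pair[tmp[i]]: on a character other than '(' / ')' Python raises KeyError — unreachable under
-- Pre_solution; the port returns the character unchanged there.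
def pairA (c : Char) : Char := if c = '(' then ')' else if c = ')' then '(' else c

-- unfolding equation for sliceGo on a cons cell
theorem sliceGo_cons (c : Char) (rest : List Char) (o cl : Int) (acc : List Char) :
    sliceGo (c :: rest) o cl acc =
      (if (if c = '(' then o + 1 else o) = (if c = ')' then cl + 1 else cl) then
        ((c :: acc).reverse, rest)
      else sliceGo rest (if c = '(' then o + 1 else o) (if c = ')' then cl + 1 else cl) (c :: acc)) := rfl

-- termination fact for the port's recursion (v is strictly shorter than p)
theorem sliceGo_snd_lt (cs : List Char) (o cl : Int) (acc : List Char) (h : cs ≠ []) :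
    (sliceGo cs o cl acc).2.length < cs.length := by
  induction cs generalizing o cl acc with
  | nil => exact absurd rfl h
  | cons c rest ih =>
    rw [sliceGo_cons]
    by_cases hz : (if c = '(' then o + 1 else o) = (if c = ')' then cl + 1 else cl)
    · rw [if_pos hz]; simp
    · rw [if_neg hz]
      cases rest with
      | nil => simp [sliceGo]
      | cons d tl => exact Nat.lt_trans (ih _ _ _ (by simp)) (by simp)

-- solution(p), on the character list (strings are ported through List Char; '+' is '++')
def solGo (cs : List Char) : List Char :=
  if h : correctGo cs [] then cs
  else
    let uv := sliceGo cs 0 0 []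
    if correctGo uv.1 [] then uv.1 ++ solGo uv.2
    else '(' :: (solGo uv.2 ++ ')' :: ((uv.1.drop 1).dropLast.map pairA))
termination_by cs.length
decreasing_by
  all_goals
    refine sliceGo_snd_lt cs 0 0 [] (fun h0 => h ?_)
    subst h0; rfl

def solution (p : String) : String := String.mk (solGo p.toList)

-- ===== PORT B =====
-- first loop of Source B: running-counter balance check (for-else: True iff never < 0 and ends at 0)
def balancedGo : List Char → Int → Bool
  | [], d => d == 0
  | c :: rest, d =>
    if c = '(' then balancedGo rest (d + 1)
    else if c = ')' then
      if d - 1 < 0 then false else balancedGo rest (d - 1)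
    else balancedGo rest d

def flipB (c : Char) : Char := if c = ')' then '(' else ')'

-- second loop of Source B: one pass; acc is the chunk under construction (p[start:i+1]),
-- out the emitted pieces (reversed), tails the stack appended back-to-front at the end.
def scanB : List Char → Int → List Char → List (List Char) → List (List Char) → List Char
  | [], _, _, out, tails => (out.reverse ++ tails).flatten
  | c :: rest, bal, acc, out, tails =>
    let bal' := if c = '(' then bal + 1 else if c = ')' then bal - 1 else bal
    if bal' = 0 then
      let u := (c :: acc).reverse
      if u.head? = some ')' then
        scanB rest 0 [] (['('] :: out) ((')' :: ((u.drop 1).dropLast.map flipB)) :: tails)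
      else scanB rest 0 [] (u :: out) tails
    else scanB rest bal' (c :: acc) out tails

def solution_alt (p : String) : String :=
  String.mk (if balancedGo p.toList 0 then p.toList else scanB p.toList 0 [] [] [])

-- ===== PRECONDITION & SPEC =====
-- Pre_ is exactly the set of inputs on which A returns: equal '(' / ')' counts (otherwise
-- slice() finds no split and A raises UnboundLocalError) and no character other than '(' / ')'
-- at a position where the preceding prefix holds more ')' than '(' (otherwise the flip step
-- raises KeyError on it).
def Pre_solution (p : String) : Prop :=
  p.toList.count '(' = p.toList.count ')' ∧
    ∀ i < p.toList.length, (p.toList.getD i ' ' ≠ '(' ∧ p.toList.getD i ' ' ≠ ')') →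
      ((p.toList.take i).count ')' : Int) ≤ ((p.toList.take i).count '(' : Int)
instance (p : String) : Decidable (Pre_solution p) := by unfold Pre_solution; infer_instance

def pvWitness_solution : String := ")("

def Spec_solution (p : String) (out : String) : Prop := out = solution_alt p
instance (p : String) (out : String) : Decidable (Spec_solution p out) := by unfold Spec_solution; infer_instance

-- ===== CLAIM (what is proved, stated in full; the proofs are below) =====
def Claim_equal_solution : Prop := ∀ (p : String), Dom_solution p → Pre_solution p → Spec_solution p (solution p)

-- ===== LEMMAS AND PROOFS =====

-- signed parenthesis balance (proof-side helper)
def balCnt : List Char → Int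
  | [] => 0
  | c :: r => (if c = '(' then 1 else if c = ')' then -1 else 0) + balCnt r

-- every character other than '(' / ')' sits at a nonnegative parenthesis depth (d = depth before cs)
def LOK (cs : List Char) (d : Int) : Prop :=
  ∀ i < cs.length, (cs.getD i ' ' ≠ '(' ∧ cs.getD i ' ' ≠ ')') → 0 ≤ d + balCnt (cs.take i)

theorem balCnt_cons (c : Char) (rest : List Char) :
    balCnt (c :: rest) = (if c = '(' then 1 else 0) - (if c = ')' then 1 else 0) + balCnt rest := by
  by_cases h1 : c = '('
  · subst h1; simp [balCnt]
  · by_cases h2 : c = ')'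
    · subst h2; simp [balCnt]
    · simp [balCnt, h1, h2]

theorem ifShift_o (c : Char) (o : Int) :
    (if c = '(' then o + 1 else o) = o + (if c = '(' then 1 else 0) := by
  split <;> simp

theorem ifShift_c (c : Char) (cl : Int) :
    (if c = ')' then cl + 1 else cl) = cl + (if c = ')' then 1 else 0) := by
  split <;> simp

theorem balShift (c : Char) (b : Int) :
    (if c = '(' then b + 1 else if c = ')' then b - 1 else b) =
      b + (if c = '(' then 1 else 0) - (if c = ')' then 1 else 0) := by
  by_cases h1 : c = '('
  · subst h1; simp
  · by_cases h2 : c = ')' <;> simp [h1, h2]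

-- unfolding equation for scanB on a cons cell
theorem scanB_cons (c : Char) (rest : List Char) (bal : Int) (acc : List Char)
    (out tails : List (List Char)) :
    scanB (c :: rest) bal acc out tails =
      (if (if c = '(' then bal + 1 else if c = ')' then bal - 1 else bal) = 0 then
        (if ((c :: acc).reverse).head? = some ')' then
          scanB rest 0 [] (['('] :: out)
            ((')' :: ((((c :: acc).reverse).drop 1).dropLast.map flipB)) :: tails)
        else
          scanB rest 0 [] ((c :: acc).reverse :: out) tails)
      else
        scanB rest (if c = '(' then bal + 1 else if c = ')' then bal - 1 else bal) (c :: acc)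
          out tails) := rfl

theorem balCnt_append (xs ys : List Char) : balCnt (xs ++ ys) = balCnt xs + balCnt ys := by
  induction xs with
  | nil => simp [balCnt]
  | cons c r ih => simp [balCnt, ih]; ring

theorem balCnt_counts (cs : List Char) :
    balCnt cs = (cs.count '(' : Int) - (cs.count ')' : Int) := by
  induction cs with
  | nil => simp [balCnt]
  | cons c r ih =>
    rw [balCnt_cons, ih]
    simp only [List.count_cons]
    by_cases h1 : c = '('
    · subst h1; simp; try omega
    · by_cases h2 : c = ')'
      · subst h2; simp [h1]; try omega
      · simp [h1, h2]

-- A's stack check equals B's counter check (the stack only ever holds '(')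
theorem correct_eq_balanced (cs : List Char) :
    ∀ stack : List Char, (∀ x ∈ stack, x = '(') →
      correctGo cs stack = balancedGo cs ((stack.length : Int)) := by
  induction cs with
  | nil =>
    intro stack _
    cases stack with
    | nil => simp [correctGo, balancedGo]
    | cons t s =>
      simp only [correctGo, balancedGo, List.isEmpty_cons, List.length_cons]
      have : ¬ ((s.length : Int) + 1 = 0) := by omega
      simp [this]
  | cons c rest ih =>
    intro stack hs
    by_cases h1 : c = '('
    · subst h1
      have hrec := ih ('(' :: stack)
        (fun x hx => by rcases List.mem_cons.mp hx with h | h; exacts [h, hs x h])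
      rw [show correctGo ('(' :: rest) stack = correctGo rest ('(' :: stack) from by
        simp [correctGo]]
      rw [show balancedGo ('(' :: rest) (stack.length : Int) = balancedGo rest ((stack.length : Int) + 1) from by
        simp [balancedGo]]
      rw [hrec]
      norm_num
    · by_cases h2 : c = ')'
      · subst h2
        cases stack with
        | nil => simp [correctGo, balancedGo, h1]
        | cons t s =>
          have ht : t = '(' := hs t (by simp)
          subst ht
          have hlt : ¬ (((s.length + 1 : Nat) : Int) - 1 < 0) := by push_cast; omega
          have hcast : ((s.length + 1 : Nat) : Int) - 1 = (s.length : Int) := by push_cast; ring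
          simp only [correctGo, balancedGo, if_neg h1, List.length_cons]
          rw [if_neg hlt, hcast]
          simpa using ih s (fun x hx => hs x (by simp [hx]))
      · simp only [correctGo, balancedGo, if_neg h1, if_neg h2]
        exact ih stack hs

-- balancedGo over an append restricts to the suffix
theorem balanced_suffix (xs : List Char) :
    ∀ (ys : List Char) (d : Int), balancedGo (xs ++ ys) d = true →
      balancedGo ys (d + balCnt xs) = true := by
  induction xs with
  | nil => intro ys d h; simpa [balCnt] using h
  | cons c rest ih =>
    intro ys d h
    by_cases h1 : c = '('
    · subst h1
      rw [show balancedGo ('(' :: rest ++ ys) d = balancedGo (rest ++ ys) (d + 1) from by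
        simp [balancedGo]] at h
      rw [show d + balCnt ('(' :: rest) = (d + 1) + balCnt rest from by simp [balCnt]; ring]
      exact ih ys (d + 1) h
    · by_cases h2 : c = ')'
      · subst h2
        rw [show balancedGo (')' :: rest ++ ys) d =
            (if d - 1 < 0 then false else balancedGo (rest ++ ys) (d - 1)) from by
          simp [balancedGo]] at h
        by_cases hlt : d - 1 < 0
        · rw [if_pos hlt] at h; exact absurd h (by simp)
        · rw [if_neg hlt] at h
          rw [show d + balCnt (')' :: rest) = (d - 1) + balCnt rest from by simp [balCnt]; ring]
          exact ih ys (d - 1) h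
      · rw [show balancedGo (c :: rest ++ ys) d = balancedGo (rest ++ ys) d from by
          simp [balancedGo, h1, h2]] at h
        rw [show d + balCnt (c :: rest) = d + balCnt rest from by simp [balCnt, h1, h2]]
        exact ih ys d h

-- the accumulator only prefixes the first component
theorem sliceGo_acc (cs : List Char) :
    ∀ (o cl : Int) (acc : List Char),
      sliceGo cs o cl acc =
        (acc.reverse ++ (sliceGo cs o cl []).1, (sliceGo cs o cl []).2) := by
  induction cs with
  | nil => intro o cl acc; simp [sliceGo]
  | cons c rest ih =>
    intro o cl acc
    rw [sliceGo_cons, sliceGo_cons]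
    by_cases hz : (if c = '(' then o + 1 else o) = (if c = ')' then cl + 1 else cl)
    · rw [if_pos hz, if_pos hz]; simp
    · rw [if_neg hz, if_neg hz, ih _ _ (c :: acc), ih _ _ [c]]; simp

theorem sliceGo_append (cs : List Char) :
    ∀ (o cl : Int) (acc : List Char),
      (sliceGo cs o cl acc).1 ++ (sliceGo cs o cl acc).2 = acc.reverse ++ cs := by
  induction cs with
  | nil => intro o cl acc; simp [sliceGo]
  | cons c rest ih =>
    intro o cl acc
    rw [sliceGo_cons]
    by_cases hz : (if c = '(' then o + 1 else o) = (if c = ')' then cl + 1 else cl)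
    · rw [if_pos hz]; simp
    · rw [if_neg hz, ih]; simp

theorem sliceGo_cnt_v (cs : List Char) :
    ∀ (o cl : Int) (acc : List Char), (o - cl) + balCnt cs = 0 →
      balCnt (sliceGo cs o cl acc).2 = 0 := by
  induction cs with
  | nil => intro o cl acc _; simp [sliceGo, balCnt]
  | cons c rest ih =>
    intro o cl acc h
    rw [sliceGo_cons]
    rw [balCnt_cons] at h
    by_cases hz : (if c = '(' then o + 1 else o) = (if c = ')' then cl + 1 else cl)
    · rw [if_pos hz]
      rw [ifShift_o, ifShift_c] at hz
      show balCnt rest = 0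
      omega
    · rw [if_neg hz]
      apply ih
      rw [ifShift_o, ifShift_c]
      omega

-- peeling one character off an LOK list
theorem LOK_cons (c : Char) (rest : List Char) (d : Int) (h : LOK (c :: rest) d) :
    LOK rest (d + ((if c = '(' then 1 else 0) - (if c = ')' then 1 else 0))) := by
  intro i hi hni
  have := h (i + 1) (by simp; omega) (by simpa using hni)
  rw [List.take_succ_cons, balCnt_cons] at this
  omega

theorem LOK_head (c : Char) (rest : List Char) (d : Int) (h : LOK (c :: rest) d)
    (hc : c ≠ '(' ∧ c ≠ ')') : 0 ≤ d := by
  have := h 0 (by simp) (by simpa using hc)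
  simpa [balCnt] using this

theorem LOK_append_right (xs : List Char) :
    ∀ (ys : List Char) (d : Int), LOK (xs ++ ys) d → LOK ys (d + balCnt xs) := by
  induction xs with
  | nil => intro ys d h; simpa [balCnt] using h
  | cons c rest ih =>
    intro ys d h
    rw [show d + balCnt (c :: rest) =
        (d + ((if c = '(' then 1 else 0) - (if c = ')' then 1 else 0))) + balCnt rest from by
      rw [balCnt_cons]; ring]
    exact ih ys _ (LOK_cons c (rest ++ ys) d h)

-- the minimal chunk cut from depth d ≥ 1 is balanced when read from depth d
theorem chunk_balanced (cs : List Char) :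
    ∀ (o cl : Int), 1 ≤ o - cl → (o - cl) + balCnt cs = 0 →
      balancedGo ((sliceGo cs o cl []).1) (o - cl) = true := by
  induction cs with
  | nil =>
    intro o cl h1 h0
    simp [balCnt] at h0
    omega
  | cons c rest ih =>
    intro o cl hd h0
    by_cases h1 : c = '('
    · subst h1
      simp [balCnt] at h0
      rw [sliceGo_cons, if_neg (by simp; omega)]
      simp only [Char.reduceEq, reduceIte]
      rw [sliceGo_acc rest (o + 1) cl ['(']]
      simp only [List.reverse_cons, List.reverse_nil, List.nil_append, List.singleton_append]
      rw [show balancedGo ('(' :: (sliceGo rest (o + 1) cl []).1) (o - cl) =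
          balancedGo ((sliceGo rest (o + 1) cl []).1) (o - cl + 1) from by simp [balancedGo]]
      rw [show o - cl + 1 = (o + 1) - cl from by ring]
      exact ih (o + 1) cl (by omega) (by omega)
    · by_cases h2 : c = ')'
      · subst h2
        simp [balCnt] at h0
        by_cases heq : o = cl + 1
        · rw [sliceGo_cons, if_pos (by simp [heq])]
          have h3 : o - cl = 1 := by omega
          simp [balancedGo, h3]
        · rw [sliceGo_cons, if_neg (by simp; omega)]
          simp only [Char.reduceEq, reduceIte]
          rw [sliceGo_acc rest o (cl + 1) [')']]
          simp only [List.reverse_cons, List.reverse_nil, List.nil_append, List.singleton_append]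
          rw [show balancedGo (')' :: (sliceGo rest o (cl + 1) []).1) (o - cl) =
              (if o - cl - 1 < 0 then false
                else balancedGo ((sliceGo rest o (cl + 1) []).1) (o - cl - 1)) from by
            simp [balancedGo]]
          rw [if_neg (by omega)]
          rw [show o - cl - 1 = o - (cl + 1) from by ring]
          exact ih o (cl + 1) (by omega) (by omega)
      · -- other character at depth ≥ 1: no split here, balance unchanged
        simp [balCnt, h1, h2] at h0
        rw [sliceGo_cons, if_neg (by simp [h1, h2]; omega)]
        simp only [h1, h2, if_false]
        rw [sliceGo_acc rest o cl [c]]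
        simp only [List.reverse_cons, List.reverse_nil, List.nil_append, List.singleton_append]
        rw [show balancedGo (c :: (sliceGo rest o cl []).1) (o - cl) =
            balancedGo ((sliceGo rest o cl []).1) (o - cl) from by simp [balancedGo, h1, h2]]
        exact ih o cl (by omega) (by omega)

-- the minimal chunk cut from depth d ≤ -1 out of an LOK list is all parentheses
theorem chunk_paren (cs : List Char) :
    ∀ (o cl : Int), o - cl ≤ -1 → (o - cl) + balCnt cs = 0 → LOK cs (o - cl) →
      ∀ x ∈ (sliceGo cs o cl []).1, x = '(' ∨ x = ')' := by
  induction cs with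
  | nil =>
    intro o cl h1 h0 _
    simp [balCnt] at h0
    omega
  | cons c rest ih =>
    intro o cl hd h0 hlok
    by_cases h1 : c = '('
    · subst h1
      simp [balCnt] at h0
      have hlok' : LOK rest ((o + 1) - cl) := by
        have := LOK_cons '(' rest (o - cl) hlok
        simpa [show o - cl + 1 = (o + 1) - cl from by ring] using this
      by_cases heq : o + 1 = cl
      · rw [sliceGo_cons, if_pos (by simp [heq])]
        intro x hx
        simp at hx
        exact Or.inl hx
      · rw [sliceGo_cons, if_neg (by simp [heq])]
        simp only [Char.reduceEq, reduceIte]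
        rw [sliceGo_acc rest (o + 1) cl ['(']]
        intro x hx
        simp at hx
        rcases hx with hx | hx
        · exact Or.inl hx
        · exact ih (o + 1) cl (by omega) (by omega) hlok' x hx
    · by_cases h2 : c = ')'
      · subst h2
        simp [balCnt] at h0
        have hlok' : LOK rest (o - (cl + 1)) := by
          have := LOK_cons ')' rest (o - cl) hlok
          simp at this
          rwa [show o - cl + -1 = o - (cl + 1) from by ring] at this
        rw [sliceGo_cons, if_neg (by simp; omega)]
        simp only [Char.reduceEq, reduceIte]
        rw [sliceGo_acc rest o (cl + 1) [')']]
        intro x hx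
        simp at hx
        rcases hx with hx | hx
        · exact Or.inr hx
        · exact ih o (cl + 1) (by omega) (by omega) hlok' x hx
      · exact absurd (LOK_head c rest (o - cl) hlok ⟨h1, h2⟩) (by omega)

-- B's scan performs exactly one slice step
theorem scan_slice (cs : List Char) :
    ∀ (o cl : Int) (acc : List Char) (out tails : List (List Char)) (b : Int),
      cs ≠ [] → b = o - cl → (o - cl) + balCnt cs = 0 →
      scanB cs b acc out tails =
        (if (sliceGo cs o cl acc).1.head? = some ')' then
            scanB (sliceGo cs o cl acc).2 0 [] (['('] :: out)
              ((')' :: (((sliceGo cs o cl acc).1.drop 1).dropLast.map flipB)) :: tails)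
          else
            scanB (sliceGo cs o cl acc).2 0 [] ((sliceGo cs o cl acc).1 :: out) tails) := by
  induction cs with
  | nil => intro o cl acc out tails b h; exact absurd rfl h
  | cons c rest ih =>
    intro o cl acc out tails b _ hb h0
    rw [scanB_cons, sliceGo_cons]
    rw [balCnt_cons] at h0
    by_cases hz : (if c = '(' then o + 1 else o) = (if c = ')' then cl + 1 else cl)
    · -- chunk boundary: both break here
      rw [if_pos hz]
      rw [ifShift_o, ifShift_c] at hz
      rw [balShift]
      rw [if_pos (by omega : b + (if c = '(' then 1 else 0) - (if c = ')' then 1 else 0) = 0)]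
    · -- no boundary: both continue
      rw [if_neg hz]
      have hz' : ¬ (b + (if c = '(' then 1 else 0) - (if c = ')' then 1 else 0) = 0) := by
        rw [ifShift_o, ifShift_c] at hz
        omega
      rw [balShift, if_neg hz']
      have h0' : ((if c = '(' then o + 1 else o) - (if c = ')' then cl + 1 else cl)) + balCnt rest = 0 := by
        rw [ifShift_o, ifShift_c]
        omega
      have hrne : rest ≠ [] := by
        intro h
        subst h
        simp only [balCnt] at h0'
        rw [ifShift_o, ifShift_c] at h0'
        rw [ifShift_o, ifShift_c] at hz
        omega
      rw [show b + (if c = '(' then 1 else 0) - (if c = ')' then 1 else 0) =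
          (if c = '(' then o + 1 else o) - (if c = ')' then cl + 1 else cl) from by
        rw [ifShift_o, ifShift_c]; omega]
      exact ih _ _ (c :: acc) out tails _ hrne rfl h0'


-- main invariant: B's scan of a zero-balance LOK list produces A's recursion, framed
theorem scan_eq_solGo (n : Nat) :
    ∀ (cs : List Char) (out tails : List (List Char)),
      cs.length ≤ n → LOK cs 0 → balCnt cs = 0 →
      scanB cs 0 [] out tails = out.reverse.flatten ++ solGo cs ++ tails.flatten := by
  induction n with
  | zero =>
    intro cs out tails hlen _ _
    have : cs = [] := List.length_eq_zero_iff.mp (Nat.le_zero.mp hlen)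
    subst this
    rw [show solGo [] = [] from by rw [solGo]; rfl]
    simp [scanB, List.flatten_append]
  | succ n ih =>
    intro cs out tails hlen hlok h0
    by_cases hnil : cs = []
    · subst hnil
      rw [show solGo [] = [] from by rw [solGo]; rfl]
      simp [scanB, List.flatten_append]
    · have h0' : ((0 : Int) - 0) + balCnt cs = 0 := by simpa using h0
      rw [scan_slice cs 0 0 [] out tails 0 hnil (by ring) h0']
      obtain ⟨u, v, huv⟩ : ∃ u v, sliceGo cs 0 0 [] = (u, v) := ⟨_, _, rfl⟩
      rw [huv]
      have hsplit : u ++ v = cs := by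
        have := sliceGo_append cs 0 0 []
        rw [huv] at this
        simpa using this
      have hcv : balCnt v = 0 := by
        have := sliceGo_cnt_v cs 0 0 [] h0'
        rwa [huv] at this
      have hcu : balCnt u = 0 := by
        have := balCnt_append u v
        rw [hsplit] at this
        omega
      have hvlt : v.length < cs.length := by
        have := sliceGo_snd_lt cs 0 0 [] hnil
        rwa [huv] at this
      have hvn : v.length ≤ n := by
        have : cs.length ≤ n + 1 := hlen
        omega
      have hlokv : LOK v 0 := by
        have := LOK_append_right u v 0 (by rw [hsplit]; exact hlok)
        simpa [hcu] using this
      have hune : u ≠ [] := by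
        intro h
        rw [h, List.nil_append] at hsplit
        rw [hsplit] at hvlt
        omega
      obtain ⟨c0, u', hu0⟩ : ∃ c0 u', u = c0 :: u' := by
        cases hh : u with
        | nil => exact absurd hh hune
        | cons a b => exact ⟨a, b, rfl⟩
      have hcbal : correctGo cs [] = balancedGo cs 0 := by
        simpa using correct_eq_balanced cs [] (by simp)
      have hubal : correctGo u [] = balancedGo u 0 := by
        simpa using correct_eq_balanced u [] (by simp)
      have hcshead : cs = c0 :: (u' ++ v) := by
        rw [← hsplit, hu0]
        simp
      by_cases hc0 : c0 = ')'
      · -- chunk starts ')' : A wraps and flips, B does the same in one step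
        rw [if_pos (by simp [hu0, hc0])]
        rw [ih v (['('] :: out) ((')' :: ((u.drop 1).dropLast.map flipB)) :: tails) hvn hlokv hcv]
        rw [hc0] at hu0 hcshead
        have hb : correctGo cs [] = false := by
          rw [hcbal, hcshead]
          simp [balancedGo]
        have hbu : correctGo u [] = false := by
          rw [hubal, hu0]
          simp [balancedGo]
        have hstep : sliceGo cs 0 0 [] =
            (')' :: (sliceGo (u' ++ v) 0 1 []).1, (sliceGo (u' ++ v) 0 1 []).2) := by
          rw [hcshead, sliceGo_cons]
          rw [if_neg (by simp)]
          simp only [Char.reduceEq, reduceIte]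
          rw [show (0 : Int) + 1 = 1 from by norm_num]
          rw [sliceGo_acc (u' ++ v) 0 1 [')']]
          simp
        rw [huv] at hstep
        have huw : u' = (sliceGo (u' ++ v) 0 1 []).1 := by
          have h1 := congrArg Prod.fst hstep
          simp [hu0] at h1
          exact h1
        have hparu' : ∀ x ∈ u', x = '(' ∨ x = ')' := by
          have hlok' : LOK (u' ++ v) (0 - 1) := by
            have := LOK_cons ')' (u' ++ v) 0 (by rw [← hcshead]; exact hlok)
            simpa using this
          have hc0' : (0 : Int) - 1 + balCnt (u' ++ v) = 0 := by
            have : balCnt cs = -1 + balCnt (u' ++ v) := by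
              rw [hcshead]; simp [balCnt]
            omega
          intro x hx
          exact chunk_paren (u' ++ v) 0 1 (by omega) hc0' hlok' x (by rw [← huw] at *; exact hx)
        have hmap : (u.drop 1).dropLast.map pairA = (u.drop 1).dropLast.map flipB := by
          apply List.map_congr_left
          intro x hx
          have hxu : x ∈ u' := by
            rw [hu0] at hx
            simp only [List.drop_one, List.tail_cons] at hx
            exact List.dropLast_subset u' hx
          rcases hparu' x hxu with h | h <;> simp [h, pairA, flipB]
        have hsol : solGo cs = '(' :: (solGo v ++ ')' :: ((u.drop 1).dropLast.map pairA)) := by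
          rw [solGo, dif_neg (by simp [hb]), huv]
          simp [hbu]
        rw [hsol, hmap]
        simp [List.flatten_append]
      · -- chunk starts '(' or another character: kept verbatim by B, and correct(u) holds for A
        rw [if_neg (by simp [hu0, hc0])]
        rw [ih v (u :: out) tails hvn hlokv hcv]
        have hcorru : correctGo u [] = true := by
          by_cases hc1 : c0 = '('
          · -- paren chunk: balanced from depth 1 by minimality
            rw [hc1] at hu0 hcshead
            have hstep : sliceGo cs 0 0 [] =
                ('(' :: (sliceGo (u' ++ v) 1 0 []).1, (sliceGo (u' ++ v) 1 0 []).2) := by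
              rw [hcshead, sliceGo_cons]
              rw [if_neg (by simp)]
              simp only [Char.reduceEq, reduceIte]
              rw [show (0 : Int) + 1 = 1 from by norm_num]
              rw [sliceGo_acc (u' ++ v) 1 0 ['(']]
              simp
            rw [huv] at hstep
            have huw : u' = (sliceGo (u' ++ v) 1 0 []).1 := by
              have h1 := congrArg Prod.fst hstep
              simp [hu0] at h1
              exact h1
            rw [hubal, hu0]
            rw [show balancedGo ('(' :: u') 0 = balancedGo u' 1 from by simp [balancedGo]]
            rw [huw]
            have hc0' : (1 : Int) - 0 + balCnt (u' ++ v) = 0 := by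
              have : balCnt cs = 1 + balCnt (u' ++ v) := by
                rw [hcshead]; simp [balCnt]
              omega
            have := chunk_balanced (u' ++ v) 1 0 (by omega) hc0'
            simpa using this
          · -- one-character chunk: slice breaks at once on a non-parenthesis character
            have hstep : sliceGo cs 0 0 [] = ([c0], u' ++ v) := by
              rw [hcshead, sliceGo_cons]
              rw [if_pos (by simp [hc1, hc0])]
              simp
            rw [huv] at hstep
            have h1 := congrArg Prod.fst hstep
            simp [hu0] at h1
            rw [hu0, h1]
            simp [correctGo, hc1, hc0]
        by_cases hb : correctGo cs [] = true
        · -- whole string already correct: A returns it; B's chunks reassemble it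
          have hsv : solGo v = v := by
            have hbv : balancedGo v 0 = true := by
              have := balanced_suffix u v 0 (by rw [hsplit, ← hcbal]; exact hb)
              simpa [hcu] using this
            rw [solGo]
            rw [dif_pos (by rw [correct_eq_balanced v [] (by simp)]; simpa using hbv)]
          have hscs : solGo cs = cs := by rw [solGo, dif_pos hb]
          rw [hscs, hsv, ← hsplit]
          simp [List.flatten_append]
        · have hsol : solGo cs = u ++ solGo v := by
            rw [solGo, dif_neg hb, huv]
            simp [hcorru]
          rw [hsol]
          simp [List.flatten_append]

-- ===== VERDICT (by name: the statement is the Claim_ definition above) =====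
theorem solution_spec : Claim_equal_solution := by
  intro p _ hpre
  unfold Spec_solution solution solution_alt
  congr 1
  obtain ⟨hcnt, hpos⟩ := hpre
  have h0 : balCnt p.toList = 0 := by
    rw [balCnt_counts]
    omega
  have hlok : LOK p.toList 0 := by
    intro i hi hni
    have := hpos i hi hni
    rw [balCnt_counts]
    omega
  have hcbal : correctGo p.toList [] = balancedGo p.toList 0 := by
    simpa using correct_eq_balanced p.toList [] (by simp)
  by_cases hb : balancedGo p.toList 0 = true
  · rw [if_pos hb]
    rw [solGo, dif_pos (by rw [hcbal]; exact hb)]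
  · rw [if_neg hb]
    have := scan_eq_solGo p.toList.length p.toList [] [] le_rfl hlok h0
    simpa using this.symm
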